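-- pv_equiv track=rewrite | github.com/infernoalert/PLANTSCADA | processor.py | _substitute_searchvar_xx_tokens
-- ===== SOURCE A (Python) =====
-- from typing import DefaultDict, Dict, List, Optional, Tuple
--
-- _SEARCHVAR_XX_EQ = "xx=="
--
-- def _substitute_searchvar_xx_tokens(
--     cell: str, comment_to_tags: DefaultDict[str, List[str]], group_needle_lower: str
-- ) -> str:
--     """
--     Replace each ``xx==<comment>`` span: ``xx`` becomes the first VARIABLE Tag Name
--     (same exact Comment) whose Tag Name contains ``group_needle_lower``; ``==`` and
--     the raw comment slice (up to ``||`` or end) stay unchanged.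
--     """
--     if _SEARCHVAR_XX_EQ not in cell:
--         return cell
--     parts: List[str] = []
--     pos = 0
--     while pos < len(cell):
--         idx = cell.find(_SEARCHVAR_XX_EQ, pos)
--         if idx == -1:
--             parts.append(cell[pos:])
--             break
--         parts.append(cell[pos:idx])
--         rest_start = idx + len(_SEARCHVAR_XX_EQ)
--         rest = cell[rest_start:]
--         bar = rest.find("||")
--         raw_comment = rest if bar == -1 else rest[:bar]
--         comment_key = raw_comment.strip()
--         end_sub = rest_start + len(raw_comment)
--         token = cell[idx:end_sub]
--         candidates = comment_to_tags.get(comment_key, [])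
--         chosen = ""
--         for tag in candidates:
--             if group_needle_lower in tag.lower():
--                 chosen = tag
--                 break
--         if chosen:
--             parts.append(chosen)
--             parts.append("==")
--             parts.append(raw_comment)
--         else:
--             parts.append(token)
--         pos = end_sub
--     return "".join(parts)
-- ===== SOURCE B (Python) =====
-- _SEARCHVAR_XX_EQ = "xx=="
--
-- def _substitute_searchvar_xx_tokens(cell, comment_to_tags, group_needle_lower):
--     """Single left-to-right character scan: copy chars until an ``xx==`` token
--     starts, then consume the comment up to ``||`` (or end) and emit the
--     replacement (or the token verbatim) directly — no find/index jumps, no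
--     parts-slicing."""
--     if _SEARCHVAR_XX_EQ not in cell:
--         return cell
--     out = []
--     i = 0
--     n = len(cell)
--     while i < n:
--         if cell.startswith(_SEARCHVAR_XX_EQ, i):
--             j = i + 4
--             while j < n and not cell.startswith("||", j):
--                 j += 1
--             raw_comment = cell[i + 4:j]
--             chosen = ""
--             for tag in comment_to_tags.get(raw_comment.strip(), []):
--                 if group_needle_lower in tag.lower():
--                     chosen = tag
--                     break
--             out.append((chosen + "==" + raw_comment) if chosen else cell[i:j])
--             i = j
--         else:
--             out.append(cell[i])
--             i += 1
--     return "".join(out)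
-- ===== Notes on version B (the rewrite author's own statement) =====
-- stated objective: alternative
-- what changed: A repeatedly calls str.find to jump between 'xx==' tokens and rebuilds the string from slice parts; B is a single left-to-right character scanner (state machine) that emits output directly, consuming each token's comment up to '||' as it goes.
import Mathlib
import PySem

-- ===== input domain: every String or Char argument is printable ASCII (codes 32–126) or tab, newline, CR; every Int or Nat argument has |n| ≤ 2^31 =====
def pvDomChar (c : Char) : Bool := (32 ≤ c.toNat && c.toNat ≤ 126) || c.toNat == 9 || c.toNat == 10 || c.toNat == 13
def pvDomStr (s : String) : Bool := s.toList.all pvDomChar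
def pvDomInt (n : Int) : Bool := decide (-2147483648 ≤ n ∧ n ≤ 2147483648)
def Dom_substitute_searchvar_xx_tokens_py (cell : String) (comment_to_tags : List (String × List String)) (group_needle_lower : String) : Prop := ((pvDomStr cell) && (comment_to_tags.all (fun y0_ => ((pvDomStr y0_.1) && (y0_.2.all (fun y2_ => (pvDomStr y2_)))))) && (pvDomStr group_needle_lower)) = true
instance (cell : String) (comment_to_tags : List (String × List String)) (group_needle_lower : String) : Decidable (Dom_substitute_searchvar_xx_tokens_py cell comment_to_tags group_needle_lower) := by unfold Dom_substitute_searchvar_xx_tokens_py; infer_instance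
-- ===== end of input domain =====

-- B replaces A's find/index/parts-slicing loop by a single left-to-right character
-- scanner that emits the output directly (objective: alternative, same cost).

-- ===== PORT A =====
-- the inner candidate loop 'for tag in candidates: if needle in tag.lower(): chosen = tag; break'
-- (this loop is textually identical in A and in B, so both ports share this helper)
def pvChooseTag (needle : List Char) : List String → List Char
  | [] => []
  | tag :: rest =>
      if PySem.Chars.isIn needle (PySem.Chars.lower tag.toList) then tag.toList
      else pvChooseTag needle rest

-- the 'while pos < len(cell)' loop of A, producing the parts list from position pos on
def pvPartsA (cell : List Char) (ctt : List (String × List String))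
    (needle : List Char) (pos : Nat) : List (List Char) :=
  if h : pos < cell.length then
    let idx := PySem.Chars.findFrom cell ("xx==".toList) (pos : Int)
    if hidx : idx = -1 then
      [PySem.Chars.slice cell (some (pos : Int)) none]       -- parts.append(cell[pos:]); break
    else
      let rest := PySem.Chars.slice cell (some (idx + 4)) none
      let bar := PySem.Chars.find rest ("||".toList)
      let raw := if bar = -1 then rest else PySem.Chars.slice rest none (some bar)
      let key := PySem.Chars.strip raw
      let token := PySem.Chars.slice cell (some idx) (some (idx + 4 + (raw.length : Int)))
      let chosen := pvChooseTag needle (PySem.Dict.getD (PySem.Dict.mk ctt) (String.ofList key) [])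
      PySem.Chars.slice cell (some (pos : Int)) (some idx) ::
        ((if chosen ≠ [] then [chosen, "==".toList, raw] else [token]) ++
          pvPartsA cell ctt needle (idx.toNat + 4 + raw.length))
  else []
termination_by cell.length - pos
decreasing_by
  have hidx' : ¬ PySem.Chars.findFrom cell ("xx==".toList) (pos : Int) = -1 := hidx
  have hle : pos ≤ cell.length := Nat.le_of_lt h
  have heq := PySem.Chars.findFrom_natCast cell ("xx==".toList) pos hle
  rw [heq] at hidx'
  rw [heq]
  have hm1 := PySem.Chars.neg_one_le_find (List.drop pos cell) ("xx==".toList)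
  split_ifs at hidx' ⊢ with hf
  · exact absurd rfl hidx'
  all_goals omega

def substitute_searchvar_xx_tokens_py (cell : String) (comment_to_tags : List (String × List String)) (group_needle_lower : String) : String :=
  if ¬ PySem.Str.isIn "xx==" cell then cell
  else String.ofList (PySem.Chars.join []
        (pvPartsA cell.toList comment_to_tags group_needle_lower.toList 0))

-- ===== PORT B =====
-- B's inner index loop 'while j < n and not cell.startswith("||", j): j += 1' on the suffix:
-- returns (chars consumed before the first "||", the remainder from there)
def pvBarSplit : List Char → (List Char × List Char)
  | [] => ([], [])
  | c :: tl =>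
      if PySem.Chars.startswith (c :: tl) ("||".toList) then ([], c :: tl)
      else
        let p := pvBarSplit tl
        (c :: p.1, p.2)

-- termination fact for pvScanB (the remainder is no longer than the input)
theorem pvBarSplit_snd_le (s : List Char) : (pvBarSplit s).2.length ≤ s.length := by
  induction s with
  | nil => simp [pvBarSplit]
  | cons c tl ih =>
      simp only [pvBarSplit]
      split
      · simp
      · simpa using Nat.le_succ_of_le ih

-- B's outer scan loop, on the suffix cell[i:] (out is emitted directly)
def pvScanB (ctt : List (String × List String)) (needle : List Char) : List Char → List Char
  | [] => []
  | c :: tl =>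
      if PySem.Chars.startswith (c :: tl) ("xx==".toList) then
        let p := pvBarSplit ((c :: tl).drop 4)
        let raw := p.1
        let chosen := pvChooseTag needle
            (PySem.Dict.getD (PySem.Dict.mk ctt) (String.ofList (PySem.Chars.strip raw)) [])
        (if chosen ≠ [] then chosen ++ ("==".toList) ++ raw
         else (c :: tl).take (4 + raw.length)) ++ pvScanB ctt needle p.2
      else c :: pvScanB ctt needle tl
termination_by s => s.length
decreasing_by
  · have h1 := pvBarSplit_snd_le ((c :: tl).drop 4)
    simp only [List.length_drop] at h1
    simp only [List.length_cons] at *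
    omega
  · simp

def substitute_searchvar_xx_tokens_py_alt (cell : String) (comment_to_tags : List (String × List String)) (group_needle_lower : String) : String :=
  if ¬ PySem.Str.isIn "xx==" cell then cell
  else String.ofList (pvScanB comment_to_tags group_needle_lower.toList cell.toList)

-- ===== PRECONDITION & SPEC =====
def Spec_substitute_searchvar_xx_tokens_py (cell : String) (comment_to_tags : List (String × List String)) (group_needle_lower : String) (out : String) : Prop := out = substitute_searchvar_xx_tokens_py_alt cell comment_to_tags group_needle_lower
instance (cell : String) (comment_to_tags : List (String × List String)) (group_needle_lower : String) (out : String) : Decidable (Spec_substitute_searchvar_xx_tokens_py cell comment_to_tags group_needle_lower out) := by unfold Spec_substitute_searchvar_xx_tokens_py; infer_instance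

-- ===== CLAIM (what is proved, stated in full; the proofs are below) =====
def Claim_equal_substitute_searchvar_xx_tokens_py : Prop := ∀ (cell : String) (comment_to_tags : List (String × List String)) (group_needle_lower : String), Dom_substitute_searchvar_xx_tokens_py cell comment_to_tags group_needle_lower → Spec_substitute_searchvar_xx_tokens_py cell comment_to_tags group_needle_lower (substitute_searchvar_xx_tokens_py cell comment_to_tags group_needle_lower)

-- ===== LEMMAS AND PROOFS =====

theorem pv_join_nil (l : List (List Char)) : PySem.Chars.join [] l = l.flatten := by
  simp [PySem.Chars.join, List.intercalate]
  induction l with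
  | nil => simp
  | cons a t ih => cases t <;> simp_all [List.intersperse]

theorem pv_find_eq (s sub : List Char) (k : Nat) (hk : sub <+: s.drop k)
    (hmin : ∀ i < k, ¬ sub <+: s.drop i) : PySem.Chars.find s sub = k := by
  have hisin : PySem.Chars.isIn sub s = true :=
    (PySem.Chars.exists_prefix_drop_iff_isIn _ _).1 ⟨k, hk⟩
  have hinf : sub <:+: s := (PySem.Chars.isIn_iff_infix _ _).1 hisin
  have hge : 0 ≤ PySem.Chars.find s sub := (PySem.Chars.find_nonneg_iff _ _).2 hinf
  obtain ⟨h1, h2⟩ := PySem.Chars.find_spec hge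
  have hfk : (PySem.Chars.find s sub).toNat = k := by
    have ha : ¬ k < (PySem.Chars.find s sub).toNat := fun hlt => h2 k hlt hk
    have hb : ¬ (PySem.Chars.find s sub).toNat < k := fun hlt => hmin _ hlt h1
    omega
  omega

theorem pv_find_cons_neg (c : Char) (tl sub : List Char) (h0 : ¬ sub <+: (c :: tl))
    (h1 : PySem.Chars.find tl sub = -1) : PySem.Chars.find (c :: tl) sub = -1 := by
  rw [PySem.Chars.find_eq_neg_one_iff] at h1 ⊢
  intro hinf
  have hisin : PySem.Chars.isIn sub (c :: tl) = true := (PySem.Chars.isIn_iff_infix _ _).2 hinf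
  obtain ⟨j, hj⟩ := (PySem.Chars.exists_prefix_drop_iff_isIn _ _).2 hisin
  cases j with
  | zero => exact h0 (by simpa using hj)
  | succ j' =>
      exact h1 ((PySem.Chars.isIn_iff_infix _ _).1
        ((PySem.Chars.exists_prefix_drop_iff_isIn _ _).1 ⟨j', by simpa using hj⟩))

theorem pv_find_cons_pos (c : Char) (tl sub : List Char) (h0 : ¬ sub <+: (c :: tl))
    (h1 : 0 ≤ PySem.Chars.find tl sub) :
    PySem.Chars.find (c :: tl) sub = PySem.Chars.find tl sub + 1 := by
  obtain ⟨p1, p2⟩ := PySem.Chars.find_spec h1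
  have := pv_find_eq (c :: tl) sub ((PySem.Chars.find tl sub).toNat + 1)
    (by simpa using p1)
    (by
      intro i hi
      cases i with
      | zero => simpa using h0
      | succ i' => simpa using p2 i' (by omega))
  omega

def pvBarK (s : List Char) : Nat :=
  if PySem.Chars.find s ("||".toList) = -1 then s.length
  else (PySem.Chars.find s ("||".toList)).toNat

theorem pvBarSplit_eq (s : List Char) :
    pvBarSplit s = (s.take (pvBarK s), s.drop (pvBarK s)) := by
  induction s with
  | nil => simp [pvBarSplit]
  | cons c tl ih =>
      rw [pvBarSplit]
      by_cases hs : PySem.Chars.startswith (c :: tl) ("||".toList)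
      · rw [if_pos hs]
        have hpre : ("||".toList) <+: (c :: tl) := (PySem.Chars.startswith_iff _ _).1 hs
        have : PySem.Chars.find (c :: tl) ("||".toList) = 0 :=
          pv_find_eq _ _ 0 (by simpa using hpre) (by omega)
        have this2 : PySem.Chars.find (c :: tl) (['|','|']) = 0 := this
        simp [pvBarK, this2]
      · rw [if_neg hs]
        have h0 : ¬ ("||".toList) <+: (c :: tl) := fun hp => hs ((PySem.Chars.startswith_iff _ _).2 hp)
        rcases eq_or_lt_of_le (PySem.Chars.neg_one_le_find tl ("||".toList)) with hneg | hpos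
        · have hneg' : PySem.Chars.find tl ("||".toList) = -1 := hneg.symm
          have hc := pv_find_cons_neg c tl _ h0 hneg'
          have hc2 : PySem.Chars.find (c :: tl) (['|','|']) = -1 := hc
          have hneg2 : PySem.Chars.find tl (['|','|']) = -1 := hneg'
          have hk : pvBarK (c :: tl) = tl.length + 1 := by simp [pvBarK, hc2]
          have hk' : pvBarK tl = tl.length := by simp [pvBarK, hneg2]
          rw [ih, hk, hk']
          simp
        · have hpos' : 0 ≤ PySem.Chars.find tl ("||".toList) := by omega
          have hc := pv_find_cons_pos c tl _ h0 hpos'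
          have hk : pvBarK (c :: tl) = pvBarK tl + 1 := by
            have hm1 := PySem.Chars.neg_one_le_find tl ("||".toList)
            simp only [pvBarK]
            rw [hc]
            split_ifs with a b b <;> omega
          rw [ih, hk]
          simp

theorem pvScanB_none (ctt : List (String × List String)) (needle : List Char)
    (s : List Char) (h : ¬ ("xx==".toList <:+: s)) : pvScanB ctt needle s = s := by
  induction s with
  | nil => rw [pvScanB]
  | cons c tl ih =>
      rw [pvScanB]
      rw [if_neg (fun hs => h (((PySem.Chars.startswith_iff _ _).1 hs).isInfix))]
      rw [ih (fun hinf => h (List.infix_cons hinf))]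

theorem pvScanB_copy (ctt : List (String × List String)) (needle : List Char)
    (i : Nat) (s : List Char) (hlen : i ≤ s.length)
    (h : ∀ j < i, ¬ ("xx==".toList <+: s.drop j)) :
    pvScanB ctt needle s = s.take i ++ pvScanB ctt needle (s.drop i) := by
  induction i generalizing s with
  | zero => simp
  | succ i' ih =>
      cases s with
      | nil => simp at hlen
      | cons c tl =>
          rw [pvScanB]
          rw [if_neg (fun hs => h 0 (by omega) ((PySem.Chars.startswith_iff _ _).1 (by simpa using hs)))]
          rw [ih tl (by simpa using hlen) (fun j hj => by simpa using h (j+1) (by omega))]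
          simp

theorem pv_main (cell : List Char) (ctt : List (String × List String)) (needle : List Char) :
    ∀ (n pos : Nat), cell.length - pos ≤ n → pos ≤ cell.length →
    PySem.Chars.join [] (pvPartsA cell ctt needle pos) = pvScanB ctt needle (cell.drop pos) := by
  intro n
  induction n with
  | zero =>
      intro pos hn hpos
      have hpe : pos = cell.length := by omega
      rw [pvPartsA, dif_neg (by omega)]
      rw [List.drop_of_length_le (by omega), pvScanB, pv_join_nil]
      rfl
  | succ n' ih =>
      intro pos hn hpos
      by_cases hlt : pos < cell.length
      case neg =>
        rw [pvPartsA, dif_neg hlt]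
        rw [List.drop_of_length_le (by omega), pvScanB, pv_join_nil]
        rfl
      case pos =>
      have heq := PySem.Chars.findFrom_natCast cell ("xx==".toList) pos hpos
      rw [pvPartsA, dif_pos hlt, heq]
      by_cases hf : PySem.Chars.find (List.drop pos cell) ("xx==".toList) = -1
      · rw [hf]
        simp only [pv_join_nil]
        rw [pvScanB_none ctt needle _ ((PySem.Chars.find_eq_neg_one_iff _ _).1 hf)]
        simp [PySem.List.slice_from_natCast]
      · -- token found at pos + fN
        set s := List.drop pos cell with hs
        have hm1 := PySem.Chars.neg_one_le_find s ("xx==".toList)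
        have hf0 : 0 ≤ PySem.Chars.find s ("xx==".toList) := by omega
        set fN := (PySem.Chars.find s ("xx==".toList)).toNat with hfN
        have hfv : PySem.Chars.find s ("xx==".toList) = (fN : Int) := by omega
        obtain ⟨hpre, hminf⟩ := PySem.Chars.find_spec hf0
        rw [hfv] at hpre hminf
        simp only [Int.toNat_natCast] at hpre hminf
        have hfle : fN ≤ s.length := by
          have := PySem.Chars.find_le_length s ("xx==".toList)
          omega
        have h4 : fN + 4 ≤ s.length := by
          have := hpre.length_le
          simp at this
          omega
        have hslen : s.length = cell.length - pos := by simp [hs]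
        -- reduce the dite on idx = -1: idx = ↑pos + ↑fN ≠ -1
        rw [hfv]
        rw [dif_neg (by omega)]
        rw [if_neg (by omega : ¬ ((fN : Int)) = -1)]
        have c2 : ((pos : Int) + (fN : Int)) = (((pos + fN : Nat)) : Int) := by push_cast; ring
        have c1 : (((pos + fN : Nat) : Int) + 4) = (((pos + fN + 4 : Nat)) : Int) := by push_cast; ring
        have hd1 : List.drop (pos + fN) cell = List.drop fN s := by
          rw [hs, List.drop_drop]
          all_goals (congr 1 <;> omega)
        have hd2 : List.drop (pos + fN + 4) cell = List.drop (fN + 4) s := by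
          rw [hs, List.drop_drop]
          all_goals (congr 1 <;> omega)
        have c4 : ∀ L : Nat, (((pos + fN + 4 : Nat) : Int) + (L : Int)) = (((pos + fN + 4 + L : Nat)) : Int) := by
          intro L; push_cast; ring
        have myns : ∀ a b : Nat, (a + 4 + b) - a = 4 + b := by intro a b; omega
        simp only [c2, c1, c4, PySem.Chars.slice_eq_listSlice, PySem.List.slice_from_natCast,
          PySem.List.slice_natCast, Int.toNat_natCast, Nat.add_sub_cancel_left, myns, hd1, hd2]
        set rest := List.drop (fN + 4) s with hrest
        have raw_eq :
            (if PySem.Chars.find rest ("||".toList) = -1 then rest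
             else PySem.List.slice rest none (some (PySem.Chars.find rest ("||".toList)))) =
            rest.take (pvBarK rest) := by
          unfold pvBarK
          split_ifs with hb
          · simp
          · have hbm := PySem.Chars.neg_one_le_find rest ("||".toList)
            have hb0 : 0 ≤ PySem.Chars.find rest ("||".toList) := by omega
            rw [PySem.List.slice_to _ hb0]
        rw [raw_eq]
        set K := pvBarK rest with hK
        set raw := rest.take K with hraw
        have hLmin : raw.length = min K rest.length := by rw [hraw]; exact List.length_take
        have hrestlen : rest.length = s.length - (fN + 4) := by rw [hrest]; simp
        have hdropKL : rest.drop K = rest.drop raw.length := by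
          by_cases hkl : K ≤ rest.length
          · congr 1
            omega
          · rw [List.drop_of_length_le (by omega), List.drop_of_length_le (by omega)]
        rw [pvScanB_copy ctt needle fN s hfle hminf]
        cases hd : List.drop fN s with
        | nil => rw [hd] at hpre; simp at hpre
        | cons c tl =>
        rw [hd] at hpre
        rw [pvScanB]
        rw [if_pos ((PySem.Chars.startswith_iff _ _).2 hpre)]
        have hb4 : (c :: tl).drop 4 = rest := by
          rw [← hd, hrest, List.drop_drop]
          all_goals (congr 1 <;> omega)
        have hbt : (c :: tl).take (4 + raw.length) = (List.drop fN s).take (4 + raw.length) := by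
          rw [hd]
        rw [hb4, hbt, pvBarSplit_eq rest, ← hK]
        have hcd : List.drop (pos + fN + 4 + raw.length) cell = rest.drop raw.length := by
          rw [hrest, hs, List.drop_drop, List.drop_drop]
          all_goals (congr 1 <;> omega)
        have hposb : pos + fN + 4 + raw.length ≤ cell.length := by omega
        have ihx := ih (pos + fN + 4 + raw.length) (by omega) hposb
        rw [hcd] at ihx
        have ihx' : (pvPartsA cell ctt needle (pos + fN + 4 + raw.length)).flatten =
            pvScanB ctt needle (rest.drop raw.length) := by rw [← pv_join_nil, ihx]
        rw [pv_join_nil]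
        simp only [List.flatten_cons, List.flatten_append, ihx', ← hdropKL, ← hs]
        split_ifs <;> simp [List.append_assoc, hd, hLmin, ← hraw]

-- ===== VERDICT (by name: the statement is the Claim_ definition above) =====
theorem substitute_searchvar_xx_tokens_py_spec : Claim_equal_substitute_searchvar_xx_tokens_py := by
  intro cell ctt needle _
  unfold Spec_substitute_searchvar_xx_tokens_py
  unfold substitute_searchvar_xx_tokens_py substitute_searchvar_xx_tokens_py_alt
  split
  · rfl
  · have := pv_main cell.toList ctt needle.toList cell.toList.length 0 (by omega) (Nat.zero_le _)
    simp only [List.drop_zero] at this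
    rw [this]
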